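-- pv_equiv track=rewrite | github.com/Ookamiko/AdventOfCode | year_2021/day/day17.py | GetAllXT
-- ===== SOURCE A (Python) =====
-- def GetAllXT(minX, maxX):
-- 	result = []
-- 	for x in range(maxX, 0, -1):
-- 		for t in range(1, x + 1):
-- 			position = t * x - (t * (t - 1) // 2)
-- 			if position > maxX:
-- 				break
-- 			if position < minX:
-- 				continue
--
-- 			result.append([x, t])
--
-- 	return result
-- ===== SOURCE B (Python) =====
-- def GetAllXT(minX, maxX):
-- 	# Sweep x downward keeping two monotone pointers a, c with
-- 	#   a = smallest t with position(x, t) >= minX   (position is strictly increasing in t on [1, x])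
-- 	#   c = largest  t in [1, x] with position(x, t) <= maxX
-- 	# Both pointers only grow as x shrinks (position shrinks with x), so the
-- 	# whole sweep is O(maxX + output) instead of rescanning t for every x.
-- 	result = []
-- 	a = 1
-- 	c = 1
-- 	for x in range(maxX, 0, -1):
-- 		while a <= x and a * x - (a * (a - 1) // 2) < minX:
-- 			a += 1
-- 		if a > x:
-- 			# peak position x*(x+1)//2 < minX here, and it only shrinks further
-- 			break
-- 		if c > x:
-- 			c = x
-- 		while c < x and (c + 1) * x - ((c + 1) * c // 2) <= maxX:
-- 			c += 1
-- 		for t in range(a, c + 1):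
-- 			result.append([x, t])
-- 	return result
-- ===== Notes on version B (the rewrite author's own statement) =====
-- stated objective: faster
-- what changed: Replaces A's per-x rescan of t (with break/continue) by a single downward sweep over x carrying two monotone pointers (smallest t reaching minX, largest t staying <= maxX) that only move forward, plus an early break once even the peak position x*(x+1)//2 falls below minX.
import Mathlib
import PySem

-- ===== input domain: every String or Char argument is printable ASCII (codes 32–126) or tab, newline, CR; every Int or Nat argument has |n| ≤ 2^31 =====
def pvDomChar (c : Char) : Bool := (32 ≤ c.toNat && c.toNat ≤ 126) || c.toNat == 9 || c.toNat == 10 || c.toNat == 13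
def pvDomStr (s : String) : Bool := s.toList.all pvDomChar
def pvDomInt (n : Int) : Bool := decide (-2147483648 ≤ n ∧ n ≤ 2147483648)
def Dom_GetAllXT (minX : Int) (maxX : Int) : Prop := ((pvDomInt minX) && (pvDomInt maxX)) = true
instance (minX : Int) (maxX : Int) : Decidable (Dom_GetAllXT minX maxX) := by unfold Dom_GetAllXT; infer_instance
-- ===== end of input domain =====

-- B replaces A's per-x rescan of t by a single downward sweep with two monotone pointers (alternative algorithm; measured faster on scan-dominated inputs).

-- ===== PORT A =====
-- inner 'for t in range(1, x+1)' with break/continue, appending to the shared result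
def pvLoopT (minX maxX x : Int) : List Int → List (List Int) → List (List Int)
  | [], acc => acc
  | t :: rest, acc =>
      let position := t * x - PySem.Int.floordiv (t * (t - 1)) 2
      if position > maxX then acc
      else if position < minX then pvLoopT minX maxX x rest acc
      else pvLoopT minX maxX x rest (acc ++ [[x, t]])

def GetAllXT (minX : Int) (maxX : Int) : List (List Int) :=
  (PySem.List.pyRange maxX 0 (-1)).foldl
    (fun acc x => pvLoopT minX maxX x (PySem.List.pyRange 1 (x + 1) 1) acc) []

-- ===== PORT B =====
-- 'while a <= x and a*x - (a*(a-1)//2) < minX: a += 1'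
def pvBumpA (minX x a : Int) : Int :=
  if h : a ≤ x ∧ a * x - PySem.Int.floordiv (a * (a - 1)) 2 < minX then
    pvBumpA minX x (a + 1)
  else a
termination_by (x + 1 - a).toNat
decreasing_by omega

-- 'while c < x and (c+1)*x - ((c+1)*c//2) <= maxX: c += 1'
def pvBumpC (maxX x c : Int) : Int :=
  if h : c < x ∧ (c + 1) * x - PySem.Int.floordiv ((c + 1) * c) 2 ≤ maxX then
    pvBumpC maxX x (c + 1)
  else c
termination_by (x - c).toNat
decreasing_by omega

-- the sweep over x = maxX, maxX-1, …, 1 carrying the two pointers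
def pvLoopB (minX maxX : Int) : List Int → Int → Int → List (List Int) → List (List Int)
  | [], _, _, acc => acc
  | x :: rest, a, c, acc =>
      let a' := pvBumpA minX x a
      if x < a' then acc
      else
        let c0 := if x < c then x else c
        let c' := pvBumpC maxX x c0
        pvLoopB minX maxX rest a' c'
          (acc ++ (PySem.List.pyRange a' (c' + 1) 1).map (fun t => [x, t]))

def GetAllXT_alt (minX : Int) (maxX : Int) : List (List Int) :=
  pvLoopB minX maxX (PySem.List.pyRange maxX 0 (-1)) 1 1 []

-- ===== PRECONDITION & SPEC =====
def Spec_GetAllXT (minX : Int) (maxX : Int) (out : List (List Int)) : Prop := out = GetAllXT_alt minX maxX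
instance (minX : Int) (maxX : Int) (out : List (List Int)) : Decidable (Spec_GetAllXT minX maxX out) := by unfold Spec_GetAllXT; infer_instance

-- ===== CLAIM (what is proved, stated in full; the proofs are below) =====
def Claim_equal_GetAllXT : Prop := ∀ (minX : Int) (maxX : Int), Dom_GetAllXT minX maxX → Spec_GetAllXT minX maxX (GetAllXT minX maxX)

-- ===== LEMMAS AND PROOFS =====

-- the position polynomial
def pvP (x t : Int) : Int := t * x - PySem.Int.floordiv (t * (t - 1)) 2

theorem pvP_two_mul (x t : Int) : 2 * pvP x t = 2 * t * x - t * (t - 1) := by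
  have he : (2 : Int) ∣ t * (t - 1) := by
    rcases Int.even_or_odd t with h | h
    · exact Dvd.dvd.mul_right h.two_dvd _
    · exact Dvd.dvd.mul_left (by rcases h with ⟨k, hk⟩; exact ⟨k, by omega⟩) _
  unfold pvP
  rw [PySem.Int.floordiv_eq_ediv_of_pos (by norm_num : (0:Int) < 2)]
  have h2 : 2 * t * x = 2 * (t * x) := by ring
  omega

-- strictly increasing in t on [1, x]
theorem pvP_lt_pvP (x s t : Int) (h1 : 1 ≤ s) (h2 : s < t) (h3 : t ≤ x) :
    pvP x s < pvP x t := by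
  have hs := pvP_two_mul x s
  have ht := pvP_two_mul x t
  nlinarith [mul_pos (show (0:Int) < t - s by omega) (show (0:Int) < 2 * x - t - s + 1 by omega)]

theorem pvP_le_pvP (x s t : Int) (h1 : 1 ≤ s) (h2 : s ≤ t) (h3 : t ≤ x) :
    pvP x s ≤ pvP x t := by
  rcases eq_or_lt_of_le h2 with h | h
  · rw [h]
  · exact le_of_lt (pvP_lt_pvP x s t h1 h h3)

-- weakly increasing in x for t ≥ 1
theorem pvP_mono_x (x x' t : Int) (ht : 1 ≤ t) (hx : x ≤ x') : pvP x t ≤ pvP x' t := by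
  have h0 := pvP_two_mul x t
  have h2 := pvP_two_mul x' t
  nlinarith [mul_le_mul_of_nonneg_left hx (show (0:Int) ≤ 2 * t by omega)]

theorem pvP_one (x : Int) : pvP x 1 = x := by
  have := pvP_two_mul x 1; omega

-- a fold whose step fixes the accumulator on every member is the identity
theorem pv_foldl_fix {α β : Type} (f : β → α → β) :
    ∀ (xs : List α) (acc : β), (∀ x ∈ xs, ∀ b, f b x = b) → xs.foldl f acc = acc := by
  intro xs
  induction xs with
  | nil => intro acc _; rfl
  | cons x rest ih =>
      intro acc h
      simp only [List.foldl_cons, h x (by simp)]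
      exact ih acc (fun y hy b => h y (by simp [hy]) b)

-- A's inner loop is the filter of the whole t-range (the break is harmless: position is increasing in t)
theorem pvLoopT_filter (minX maxX x : Int) : ∀ (n : Nat) (s : Int), (x + 1 - s).toNat = n → 1 ≤ s →
    ∀ acc, pvLoopT minX maxX x (PySem.List.pyRange s (x + 1) 1) acc
      = acc ++ ((PySem.List.pyRange s (x + 1) 1).filter
          (fun t => decide (minX ≤ pvP x t) && decide (pvP x t ≤ maxX))).map (fun t => [x, t]) := by
  intro n
  induction n with
  | zero =>
      intro s hn hs acc
      rw [PySem.List.pyRange_one_eq_nil (by omega)]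
      simp [pvLoopT]
  | succ n ih =>
      intro s hn hs acc
      rw [PySem.List.pyRange_one_cons (by omega)]
      by_cases hbrk : maxX < pvP x s
      · -- break: nothing later qualifies either
        have hnil : ((s :: PySem.List.pyRange (s + 1) (x + 1) 1).filter
            (fun t => decide (minX ≤ pvP x t) && decide (pvP x t ≤ maxX))) = [] := by
          rw [List.filter_eq_nil_iff]
          intro t ht
          have htmem : s ≤ t ∧ t ≤ x := by
            rcases List.mem_cons.1 ht with h | h
            · omega
            · have := (PySem.List.mem_pyRange_one (x := t) (a := s + 1) (b := x + 1)).1 h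
              omega
          have : pvP x s ≤ pvP x t := pvP_le_pvP x s t hs htmem.1 htmem.2
          simp; omega
        rw [hnil]
        show pvLoopT minX maxX x (s :: PySem.List.pyRange (s + 1) (x + 1) 1) acc = acc ++ [].map (fun t => [x, t])
        simp only [pvLoopT]
        rw [if_pos (by exact hbrk)]
        simp
      · by_cases hcont : pvP x s < minX
        · -- continue
          show pvLoopT minX maxX x (s :: PySem.List.pyRange (s + 1) (x + 1) 1) acc = _
          simp only [pvLoopT]
          rw [if_neg (by exact hbrk), if_pos (by exact hcont)]
          rw [ih (s + 1) (by omega) (by omega) acc]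
          rw [List.filter_cons_of_neg (by simp; omega)]
        · -- append
          show pvLoopT minX maxX x (s :: PySem.List.pyRange (s + 1) (x + 1) 1) acc = _
          simp only [pvLoopT]
          rw [if_neg (by exact hbrk), if_neg (by exact hcont)]
          rw [ih (s + 1) (by omega) (by omega) (acc ++ [[x, s]])]
          rw [List.filter_cons_of_pos (by simp; omega)]
          simp

-- filtering a unit range by an interval test gives a subrange
theorem pv_filter_interval (lo hi : Int) : ∀ (n : Nat) (a b : Int), (b - a).toNat = n →
    (PySem.List.pyRange a b 1).filter (fun t => decide (lo ≤ t) && decide (t ≤ hi))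
      = PySem.List.pyRange (max a lo) (min b (hi + 1)) 1 := by
  intro n
  induction n with
  | zero =>
      intro a b hn
      rw [PySem.List.pyRange_one_eq_nil (by omega), PySem.List.pyRange_one_eq_nil (by omega)]
      rfl
  | succ n ih =>
      intro a b hn
      rw [PySem.List.pyRange_one_cons (by omega)]
      by_cases h1 : lo ≤ a ∧ a ≤ hi
      · rw [List.filter_cons_of_pos (by simp; omega)]
        rw [ih (a + 1) b (by omega)]
        rw [show max (a + 1) lo = a + 1 by omega, show max a lo = a by omega]
        exact (PySem.List.pyRange_one_cons (by omega : a < min b (hi + 1))).symm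
      · rw [List.filter_cons_of_neg (by simp; omega)]
        rw [ih (a + 1) b (by omega)]
        by_cases h2 : a < lo
        · rw [show max (a + 1) lo = max a lo by omega]
        · -- hi < a: both sides empty
          rw [PySem.List.pyRange_one_eq_nil (by omega), PySem.List.pyRange_one_eq_nil (by omega)]

-- pointer-advance specs
theorem pvBumpA_spec (minX x a : Int) :
    a ≤ pvBumpA minX x a ∧
    (∀ t, a ≤ t → t < pvBumpA minX x a → pvP x t < minX) ∧
    (pvBumpA minX x a ≤ x → minX ≤ pvP x (pvBumpA minX x a)) := by
  fun_induction pvBumpA minX x a with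
  | case1 a h ih =>
      refine ⟨by omega, ?_, ih.2.2⟩
      intro t h1 h2
      rcases eq_or_lt_of_le h1 with h3 | h3
      · have : pvP x a < minX := h.2
        rw [← h3]; exact this
      · exact ih.2.1 t (by omega) h2
  | case2 a h =>
      refine ⟨le_rfl, by intro t h1 h2; omega, ?_⟩
      intro hax
      have : ¬ pvP x a < minX := fun hc => h ⟨hax, hc⟩
      omega

theorem pvBumpC_spec (maxX x c : Int) (hcx : c ≤ x) :
    c ≤ pvBumpC maxX x c ∧ pvBumpC maxX x c ≤ x ∧
    (∀ t, c < t → t ≤ pvBumpC maxX x c → pvP x t ≤ maxX) ∧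
    (pvBumpC maxX x c < x → maxX < pvP x (pvBumpC maxX x c + 1)) := by
  have hpe : ∀ d : Int, pvP x (d + 1) = (d + 1) * x - PySem.Int.floordiv ((d + 1) * d) 2 := by
    intro d
    unfold pvP
    rw [show (d + 1) * (d + 1 - 1) = (d + 1) * d from by ring]
  fun_induction pvBumpC maxX x c with
  | case1 c h ih =>
      obtain ⟨i1, i2, i3, i4⟩ := ih (by omega)
      refine ⟨by omega, i2, ?_, i4⟩
      intro t h1 h2
      rcases eq_or_lt_of_le (show c + 1 ≤ t by omega) with h3 | h3
      · have : pvP x (c + 1) ≤ maxX := by rw [hpe]; exact h.2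
        rw [← h3]; exact this
      · exact i3 t (by omega) h2
  | case2 c h =>
      refine ⟨le_rfl, hcx, by intro t h1 h2; omega, ?_⟩
      intro hcx'
      have : ¬ pvP x (c + 1) ≤ maxX := fun hc => h ⟨hcx', by rw [← hpe]; exact hc⟩
      omega

-- the sweep agrees with A's per-x rescan, given the pointer invariants
theorem pvLoopB_eq (minX maxX : Int) : ∀ (n : Nat) (x0 : Int), x0.toNat = n →
    ∀ (a c : Int) (acc : List (List Int)), 1 ≤ a → 1 ≤ c →
    (∀ t, 1 ≤ t → t < a → pvP x0 t < minX) →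
    (∀ t, 1 ≤ t → t ≤ c → t ≤ x0 → pvP x0 t ≤ maxX) →
    pvLoopB minX maxX (PySem.List.pyRange x0 0 (-1)) a c acc
      = (PySem.List.pyRange x0 0 (-1)).foldl
          (fun acc x => pvLoopT minX maxX x (PySem.List.pyRange 1 (x + 1) 1) acc) acc := by
  intro n
  induction n with
  | zero =>
      intro x0 hn a c acc _ _ _ _
      rw [PySem.List.pyRange_neg_one_eq_nil (by omega)]
      rfl
  | succ n ih =>
      intro x0 hn a c acc ha hc hinvA hinvC
      have hx0 : 1 ≤ x0 := by omega
      rw [PySem.List.pyRange_neg_one_cons (by omega)]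
      obtain ⟨bA1, bA2, bA3⟩ := pvBumpA_spec minX x0 a
      -- every t < pvBumpA … fails the minX test at x0
      have hA' : ∀ t, 1 ≤ t → t < pvBumpA minX x0 a → pvP x0 t < minX := by
        intro t h1 h2
        by_cases h3 : t < a
        · exact hinvA t h1 h3
        · exact bA2 t (by omega) h2
      show pvLoopB minX maxX (x0 :: PySem.List.pyRange (x0 - 1) 0 (-1)) a c acc = _
      simp only [pvLoopB]
      by_cases hskip : x0 < pvBumpA minX x0 a
      · rw [if_pos hskip]
        -- A also produces nothing for x0 and for every smaller x
        have hall : ∀ x, 1 ≤ x → x ≤ x0 → ∀ b,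
            pvLoopT minX maxX x (PySem.List.pyRange 1 (x + 1) 1) b = b := by
          intro x hx1 hx2 b
          rw [pvLoopT_filter minX maxX x (x + 1 - 1).toNat 1 rfl le_rfl b]
          have : ((PySem.List.pyRange 1 (x + 1) 1).filter
              (fun t => decide (minX ≤ pvP x t) && decide (pvP x t ≤ maxX))) = [] := by
            rw [List.filter_eq_nil_iff]
            intro t ht
            have htb := (PySem.List.mem_pyRange_one (x := t) (a := 1) (b := x + 1)).1 ht
            have h1 : pvP x t ≤ pvP x0 t := pvP_mono_x x x0 t (by omega) hx2
            have h2 : pvP x0 t < minX := hA' t (by omega) (by omega)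
            simp; omega
          rw [this]
          simp
        refine (pv_foldl_fix _ _ _ ?_).symm
        intro x hx b
        rcases List.mem_cons.1 hx with h | h
        · subst h; exact hall _ hx0 le_rfl b
        · have := (PySem.List.mem_pyRange_neg_one (x := x) (a := x0 - 1) (b := 0)).1 h
          exact hall x (by omega) (by omega) b
      · rw [if_neg hskip]
        have hax : pvBumpA minX x0 a ≤ x0 := by omega
        -- the c pointer after the clamp
        have hc0 : (if x0 < c then x0 else c) ≤ x0 := by split <;> omega
        have hc01 : 1 ≤ (if x0 < c then x0 else c) := by split <;> omega
        obtain ⟨bC1, bC2, bC3, bC4⟩ := pvBumpC_spec maxX x0 (if x0 < c then x0 else c) hc0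
        -- every t ≤ pvBumpC … passes the maxX test at x0
        have hC' : ∀ t, 1 ≤ t → t ≤ pvBumpC maxX x0 (if x0 < c then x0 else c) → pvP x0 t ≤ maxX := by
          intro t h1 h2
          by_cases h3 : t ≤ (if x0 < c then x0 else c)
          · exact hinvC t h1 (by revert h3; split <;> omega) (by omega)
          · exact bC3 t (by omega) h2
        -- A's inner result for x0 is exactly the pointer interval
        have hinner : ∀ b, pvLoopT minX maxX x0 (PySem.List.pyRange 1 (x0 + 1) 1) b
            = b ++ (PySem.List.pyRange (pvBumpA minX x0 a)
                (pvBumpC maxX x0 (if x0 < c then x0 else c) + 1) 1).map (fun t => [x0, t]) := by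
          intro b
          rw [pvLoopT_filter minX maxX x0 (x0 + 1 - 1).toNat 1 rfl le_rfl b]
          congr 1
          congr 1
          rw [List.filter_congr (q := fun t => decide (pvBumpA minX x0 a ≤ t) &&
              decide (t ≤ pvBumpC maxX x0 (if x0 < c then x0 else c)))]
          · rw [pv_filter_interval _ _ (x0 + 1 - 1).toNat 1 (x0 + 1) rfl]
            congr 1 <;> omega
          · intro t ht
            have htb := (PySem.List.mem_pyRange_one (x := t) (a := 1) (b := x0 + 1)).1 ht
            rw [Bool.eq_iff_iff]
            simp only [Bool.and_eq_true, decide_eq_true_eq]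
            constructor
            · rintro ⟨hmin, hmax⟩
              constructor
              · by_contra hlt
                have := hA' t (by omega) (by omega)
                omega
              · by_contra hgt
                have h1 : pvBumpC maxX x0 (if x0 < c then x0 else c) < x0 := by omega
                have h2 := bC4 h1
                have h3 : pvP x0 (pvBumpC maxX x0 (if x0 < c then x0 else c) + 1) ≤ pvP x0 t :=
                  pvP_le_pvP x0 _ t (by omega) (by omega) (by omega)
                omega
            · rintro ⟨hlo, hhi⟩
              constructor
              · have h1 : minX ≤ pvP x0 (pvBumpA minX x0 a) := bA3 hax
                have h2 : pvP x0 (pvBumpA minX x0 a) ≤ pvP x0 t :=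
                  pvP_le_pvP x0 _ t (by omega) hlo (by omega)
                omega
              · exact hC' t (by omega) hhi
        rw [ih (x0 - 1) (by omega) _ _ _ (by omega) (by omega)
          (by intro t h1 h2
              calc pvP (x0 - 1) t ≤ pvP x0 t := pvP_mono_x _ _ t h1 (by omega)
                _ < minX := hA' t h1 h2)
          (by intro t h1 h2 h3
              calc pvP (x0 - 1) t ≤ pvP x0 t := pvP_mono_x _ _ t h1 (by omega)
                _ ≤ maxX := hC' t h1 h2)]
        rw [List.foldl_cons]
        rw [hinner acc]

-- ===== VERDICT (by name: the statement is the Claim_ definition above) =====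
theorem GetAllXT_spec : Claim_equal_GetAllXT := by
  intro minX maxX _
  show GetAllXT minX maxX = GetAllXT_alt minX maxX
  unfold GetAllXT GetAllXT_alt
  have inv1 : ∀ t : Int, 1 ≤ t → t < 1 → pvP maxX t < minX := by
    intro t h1 h2; omega
  have inv2 : ∀ t : Int, 1 ≤ t → t ≤ 1 → t ≤ maxX → pvP maxX t ≤ maxX := by
    intro t h1 h2 h3
    have ht : t = 1 := by omega
    subst ht
    rw [pvP_one]
  exact (pvLoopB_eq minX maxX maxX.toNat maxX rfl 1 1 [] le_rfl le_rfl inv1 inv2).symm
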